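-- pv_equiv track=rewrite | github.com/PimpMyNines/JFKReveal | src/jfkreveal/database/text_cleaner.py | _process_digit_to_letter
-- ===== SOURCE A (Python) =====
-- def _process_digit_to_letter(text: str) -> str:
--     """
--     Process digit-to-letter replacements in a single pass to ensure idempotence.
--
--     Args:
--         text: Text to process
--
--     Returns:
--         Text with digit-to-letter replacements
--     """
--     if not text:
--         return text
--
--     # Define digit-to-letter mappings
--     mappings = {
--         '0': 'O',  # 0 -> O
--         '1': 'I',  # 1 -> I
--         '5': 'S',  # 5 -> S
--         '8': 'B',  # 8 -> B
--         '6': 'G',  # 6 -> G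
--     }
--
--     result = []
--     i = 0
--     while i < len(text):
--         # If current character is a digit followed by a letter, and not preceded by a letter
--         if (i < len(text) - 1 and
--             text[i] in mappings and
--             i + 1 < len(text) and text[i+1].isalpha() and
--             (i == 0 or not text[i-1].isalpha())):
--             result.append(mappings[text[i]])
--         else:
--             result.append(text[i])
--         i += 1
--
--     return ''.join(result)
-- ===== SOURCE B (Python) =====
-- import re
--
-- _MAP = {'0': 'O', '1': 'I', '5': 'S', '8': 'B', '6': 'G'}
--
--
-- def _process_digit_to_letter(text: str) -> str:
--     if not text:
--         return text
--
--     def repl(m):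
--         p = m.start()
--         if p + 1 < len(text) and text[p + 1].isalpha() and (p == 0 or not text[p - 1].isalpha()):
--             return _MAP[m.group()]
--         return m.group()
--
--     return re.sub(r'[01568]', repl, text)
-- ===== Notes on version B (the rewrite author's own statement) =====
-- stated objective: idiomatic
-- what changed: Replaces A's manual while-loop with index bookkeeping and a result list by a single re.sub over the digit class [01568] whose callback checks the neighbours of the match position in the original string.
import Mathlib
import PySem

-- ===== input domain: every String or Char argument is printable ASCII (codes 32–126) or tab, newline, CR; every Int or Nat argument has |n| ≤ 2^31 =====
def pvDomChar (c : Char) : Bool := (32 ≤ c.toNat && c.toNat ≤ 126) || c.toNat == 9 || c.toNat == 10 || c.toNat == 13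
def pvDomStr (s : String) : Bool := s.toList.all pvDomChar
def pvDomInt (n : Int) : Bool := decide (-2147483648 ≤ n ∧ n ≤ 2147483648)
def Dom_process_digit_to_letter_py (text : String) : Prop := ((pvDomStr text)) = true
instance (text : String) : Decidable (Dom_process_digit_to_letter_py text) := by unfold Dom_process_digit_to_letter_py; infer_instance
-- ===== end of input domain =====

-- B rewrites A's manual index loop as one regex substitution over the digit class,
-- with the neighbour checks done against the original string (idiomatic; same cost).

-- ===== PORT A =====
def pvA_mappings : PySem.Dict Char Char :=
  PySem.Dict.mk [('0', 'O'), ('1', 'I'), ('5', 'S'), ('8', 'B'), ('6', 'G')]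

def process_digit_to_letter_py (text : String) : String :=
  if text = "" then text
  else
    let cs := text.toList
    let n : Int := (cs.length : Int)
    -- while i < len(text): … ; i += 1  — the loop over i = 0 .. n-1 appending to result
    let result : List Char :=
      (PySem.List.pyRange 0 n 1).foldl (fun acc i =>
        if (i < n - 1 ∧
            pvA_mappings.contains (PySem.List.pyGetD cs i ' ') = true ∧
            i + 1 < n ∧
            PySem.Chars.isalpha (PySem.List.pyGetD cs (i + 1) ' ') = true ∧
            (i = 0 ∨ ¬ PySem.Chars.isalpha (PySem.List.pyGetD cs (i - 1) ' ') = true))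
        then acc ++ [pvA_mappings.getD (PySem.List.pyGetD cs i ' ') (PySem.List.pyGetD cs i ' ')]
        else acc ++ [PySem.List.pyGetD cs i ' ']) []
    String.ofList result

-- ===== PORT B =====
def pvB_MAP : PySem.Dict Char Char :=
  PySem.Dict.mk [('0', 'O'), ('1', 'I'), ('5', 'S'), ('8', 'B'), ('6', 'G')]

-- re.sub(r'[01568]', repl, text): every character of the class is replaced by repl's
-- value at its position p (= m.start()); all other characters are kept unchanged.
def process_digit_to_letter_py_alt (text : String) : String :=
  if text = "" then text
  else
    let cs := text.toList
    String.ofList ((PySem.List.enumerate cs).map (fun pc =>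
      if pc.2 ∈ ['0', '1', '5', '6', '8'] then
        -- repl: p = m.start(); neighbour tests on the original text
        if pc.1 + 1 < (cs.length : Int) ∧
           PySem.Chars.isalpha (PySem.List.pyGetD cs (pc.1 + 1) ' ') = true ∧
           (pc.1 = 0 ∨ ¬ PySem.Chars.isalpha (PySem.List.pyGetD cs (pc.1 - 1) ' ') = true)
        then (pvB_MAP.get? pc.2).getD pc.2
        else pc.2
      else pc.2))

-- ===== PRECONDITION & SPEC =====
def Spec_process_digit_to_letter_py (text : String) (out : String) : Prop := out = process_digit_to_letter_py_alt text
instance (text : String) (out : String) : Decidable (Spec_process_digit_to_letter_py text out) := by unfold Spec_process_digit_to_letter_py; infer_instance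

-- ===== CLAIM (what is proved, stated in full; the proofs are below) =====
def Claim_equal_process_digit_to_letter_py : Prop := ∀ (text : String), Dom_process_digit_to_letter_py text → Spec_process_digit_to_letter_py text (process_digit_to_letter_py text)

-- ===== LEMMAS AND PROOFS =====

-- A's loop body, branches fused into one append
theorem pvA_body_fuse {α β : Type} (c : α → Prop) [DecidablePred c] (f g : α → β) :
    (fun (acc : List β) (i : α) => if c i then acc ++ [f i] else acc ++ [g i])
      = (fun acc i => acc ++ [if c i then f i else g i]) := by
  funext acc i
  by_cases h : c i <;> simp [h]

-- pointwise agreement of the two per-position values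
theorem pv_point (cs : List Char) (j : Int) :
    (if (j < (cs.length : Int) - 1 ∧
          pvA_mappings.contains (PySem.List.pyGetD cs j ' ') = true ∧
          j + 1 < (cs.length : Int) ∧
          PySem.Chars.isalpha (PySem.List.pyGetD cs (j + 1) ' ') = true ∧
          (j = 0 ∨ ¬ PySem.Chars.isalpha (PySem.List.pyGetD cs (j - 1) ' ') = true))
      then pvA_mappings.getD (PySem.List.pyGetD cs j ' ') (PySem.List.pyGetD cs j ' ')
      else PySem.List.pyGetD cs j ' ')
    = (if PySem.List.pyGetD cs j ' ' ∈ ['0', '1', '5', '6', '8'] then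
        if j + 1 < (cs.length : Int) ∧
           PySem.Chars.isalpha (PySem.List.pyGetD cs (j + 1) ' ') = true ∧
           (j = 0 ∨ ¬ PySem.Chars.isalpha (PySem.List.pyGetD cs (j - 1) ' ') = true)
        then (pvB_MAP.get? (PySem.List.pyGetD cs j ' ')).getD (PySem.List.pyGetD cs j ' ')
        else PySem.List.pyGetD cs j ' '
      else PySem.List.pyGetD cs j ' ') := by
  by_cases hm : PySem.List.pyGetD cs j ' ' ∈ ['0', '1', '5', '6', '8']
  · simp only [List.mem_cons, List.not_mem_nil, or_false] at hm
    rcases hm with hm | hm | hm | hm | hm <;>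
      rw [hm] <;>
      simp only [pvA_mappings, pvB_MAP, PySem.Dict.contains_mk, PySem.Dict.getD,
        PySem.Dict.get?, List.any_cons, List.any_nil] <;>
      norm_num <;>
      split_ifs with h1 h2 h3 <;>
      first
        | rfl
        | exact absurd h1.2 h2
        | (obtain ⟨hlt, hx, hy⟩ := h3; exact absurd ⟨by omega, hlt, hx, hy⟩ h1)
  · have hnot : pvA_mappings.contains (PySem.List.pyGetD cs j ' ') = false := by
      simp only [List.mem_cons, List.not_mem_nil, or_false, not_or] at hm
      obtain ⟨h0, h1', h5, h6, h8⟩ := hm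
      simp only [pvA_mappings, PySem.Dict.contains_mk, List.any_cons, List.any_nil,
        Bool.or_eq_false_iff, beq_eq_false_iff_ne, ne_eq]
      exact ⟨fun h => h0 h.symm, fun h => h1' h.symm, fun h => h5 h.symm,
             fun h => h8 h.symm, ⟨fun h => h6 h.symm, trivial⟩⟩
    simp [hm, hnot]

-- ===== VERDICT (by name: the statement is the Claim_ definition above) =====
theorem process_digit_to_letter_py_spec : Claim_equal_process_digit_to_letter_py := by
  intro text _
  unfold Spec_process_digit_to_letter_py process_digit_to_letter_py process_digit_to_letter_py_alt
  by_cases he : text = ""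
  · simp [he]
  · simp only [he, if_false]
    congr 1
    rw [pvA_body_fuse, PySem.List.foldl_append_singleton_eq_map,
        PySem.List.enumerate_eq_map_pyRange text.toList ' ', List.map_map, List.nil_append]
    exact List.map_congr_left (fun j _ => pv_point text.toList j)
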